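-- pv_equiv track=rewrite | github.com/Vskesha/learning-modules | leetcode_solutions/logest_obstacle_course_1964.py | longest_obstacle_course2
-- ===== SOURCE A (Python) =====
-- from bisect import bisect
--
-- def longest_obstacle_course2(obstacles: list[int]):
--     l = len(obstacles)
--     ans = [1] * l
--     sorted_passed = [obstacles[0]]
--     for i in range(1, l):
--         pos = bisect(sorted_passed, obstacles[i])
--         sorted_passed.insert(pos, obstacles[i])
--         ans[i] = pos + 1
--     return ans
-- ===== SOURCE B (Python) =====
-- def longest_obstacle_course2(obstacles: list[int]):
--     return [1 + sum(v <= x for v in obstacles[:i]) for i, x in enumerate(obstacles)]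
-- ===== Notes on version B (the rewrite author's own statement) =====
-- stated objective: simpler
-- what changed: A incrementally maintains a sorted copy of the prefix and reads each answer off a bisect position; B drops the sorted structure entirely and directly counts, per index, the prefix elements <= the current value in one comprehension.
-- crash fix: On the empty list A raises IndexError (it reads obstacles[0] unconditionally); B returns []. — e.g. on longest_obstacle_course2([]): A raises IndexError, B returns []
import Mathlib
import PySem

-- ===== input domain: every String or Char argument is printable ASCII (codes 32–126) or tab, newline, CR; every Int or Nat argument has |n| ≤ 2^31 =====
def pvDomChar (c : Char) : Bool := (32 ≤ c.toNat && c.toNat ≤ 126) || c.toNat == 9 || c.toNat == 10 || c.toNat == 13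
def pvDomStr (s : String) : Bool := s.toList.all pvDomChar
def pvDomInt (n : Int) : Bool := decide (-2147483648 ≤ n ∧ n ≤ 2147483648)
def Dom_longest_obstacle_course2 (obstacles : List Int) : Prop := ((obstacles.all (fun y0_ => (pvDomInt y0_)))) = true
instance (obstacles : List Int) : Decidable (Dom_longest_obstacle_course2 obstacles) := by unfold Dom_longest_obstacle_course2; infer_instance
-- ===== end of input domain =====

-- B replaces A's incrementally maintained sorted prefix (bisect + insert) by a direct
-- per-index count of prefix elements ≤ the current value (objective: simpler).

-- ===== PORT A =====
-- bisect.bisect is PySem.List.bisectRight; sorted_passed.insert(pos, x) is PySem.List.insert;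
-- ans[i] = v is PySem.List.pySetD (i ∈ range(1, l) is always in range).
def longest_obstacle_course2 (obstacles : List Int) : List Int :=
  match obstacles with
  | [] => []  -- Python raises IndexError here (obstacles[0]); excluded by Pre_
  | o0 :: rest =>
    ((PySem.List.pyRange 1 (PySem.List.len (o0 :: rest))).foldl
      (fun (st : List Int × List Int) i =>
        let x := PySem.List.pyGetD (o0 :: rest) i 0
        let pos := PySem.List.bisectRight st.1 x
        (PySem.List.insert st.1 (pos : Int) x,
         PySem.List.pySetD st.2 i ((pos : Int) + 1)))
      ([o0], List.replicate (o0 :: rest).length 1)).2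

-- ===== PORT B =====
-- obstacles[:i] is PySem.List.slice; sum(v <= x for v in …) is the 0/1 sum written out.
def longest_obstacle_course2_alt (obstacles : List Int) : List Int :=
  (PySem.List.enumerate obstacles).map (fun ix =>
    1 + ((PySem.List.slice obstacles none (some ix.1)).map
          (fun v => if v ≤ ix.2 then (1 : Int) else 0)).sum)

-- ===== PRECONDITION & SPEC =====
-- Pre_ excludes only the empty list, on which A raises IndexError (obstacles[0]).
def Pre_longest_obstacle_course2 (obstacles : List Int) : Prop := obstacles ≠ []
instance (obstacles : List Int) : Decidable (Pre_longest_obstacle_course2 obstacles) := by unfold Pre_longest_obstacle_course2; infer_instance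
def pvWitness_longest_obstacle_course2 : List Int := [2, 1, 2]

-- On the empty list A raises IndexError (it reads obstacles[0] unconditionally); B returns [].
def Raises_longest_obstacle_course2 (obstacles : List Int) : Prop := obstacles = []
instance (obstacles : List Int) : Decidable (Raises_longest_obstacle_course2 obstacles) := by unfold Raises_longest_obstacle_course2; infer_instance
def pvRaiseWitness_longest_obstacle_course2 : List Int := []
def pvRaiseWitnessOut_longest_obstacle_course2 : List Int := []

def Spec_longest_obstacle_course2 (obstacles : List Int) (out : List Int) : Prop := out = longest_obstacle_course2_alt obstacles
instance (obstacles : List Int) (out : List Int) : Decidable (Spec_longest_obstacle_course2 obstacles out) := by unfold Spec_longest_obstacle_course2; infer_instance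

-- ===== CLAIM (what is proved, stated in full; the proofs are below) =====
def Claim_equal_longest_obstacle_course2 : Prop := ∀ (obstacles : List Int), Dom_longest_obstacle_course2 obstacles → Pre_longest_obstacle_course2 obstacles → Spec_longest_obstacle_course2 obstacles (longest_obstacle_course2 obstacles)
def Claim_raises_longest_obstacle_course2 : Prop := (∀ (obstacles : List Int), Dom_longest_obstacle_course2 obstacles → Raises_longest_obstacle_course2 obstacles → ¬ Pre_longest_obstacle_course2 obstacles) ∧ (Dom_longest_obstacle_course2 (pvRaiseWitness_longest_obstacle_course2) ∧ Raises_longest_obstacle_course2 (pvRaiseWitness_longest_obstacle_course2) ∧ longest_obstacle_course2_alt (pvRaiseWitness_longest_obstacle_course2) = pvRaiseWitnessOut_longest_obstacle_course2)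

-- ===== LEMMAS AND PROOFS =====

-- B's value at index k, in closed form.
def bVal (xs : List Int) (k : Nat) : Int :=
  1 + ((xs.take k).countP (fun v => decide (v ≤ xs.getD k 0)) : Int)

lemma alt_eq (xs : List Int) :
    longest_obstacle_course2_alt xs = (List.range xs.length).map (bVal xs) := by
  unfold longest_obstacle_course2_alt
  rw [PySem.List.enumerate_eq_map_pyRange xs 0, List.map_map,
      PySem.List.len_eq, PySem.List.pyRange_zero_natCast, List.map_map]
  refine List.map_congr_left ?_
  intro k hk
  simp only [Function.comp, bVal]
  rw [PySem.List.slice_to xs (by positivity)]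
  have h := PySem.List.sum_map_ite_one_zero (fun v => decide (v ≤ xs.getD k 0)) (xs.take k)
  simp only [decide_eq_true_eq, List.getD_eq_getElem?_getD] at h
  simp [PySem.List.pyGetD_natCast, List.getD_eq_getElem?_getD, -List.map_take, h]

lemma countP_split (xs : List Int) (x : Int) (p : Nat) (hp : p ≤ xs.length)
    (h1 : ∀ (j : Nat) (_ : j < xs.length), j < p → xs[j] ≤ x)
    (h2 : ∀ (j : Nat) (_ : j < xs.length), p ≤ j → x < xs[j]) :
    xs.countP (fun v => decide (v ≤ x)) = p := by
  conv_lhs => rw [← List.take_append_drop p xs]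
  rw [List.countP_append]
  have ht : (xs.take p).countP (fun v => decide (v ≤ x)) = (xs.take p).length := by
    rw [List.countP_eq_length]
    intro a ha
    rw [List.mem_take_iff_getElem] at ha
    obtain ⟨j, hm, rfl⟩ := ha
    simp only [decide_eq_true_iff]
    exact h1 j (by omega) (by omega)
  have hd : (xs.drop p).countP (fun v => decide (v ≤ x)) = 0 := by
    rw [List.countP_eq_zero]
    intro a ha
    rw [List.mem_drop_iff_getElem] at ha
    obtain ⟨j, hm, rfl⟩ := ha
    simp only [decide_eq_true_iff, not_le]
    exact h2 (p + j) (by omega) (by omega)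
  rw [ht, hd, List.length_take]
  omega

lemma pairwise_split (xs : List Int) (x : Int) (p : Nat) (hs : xs.Pairwise (· ≤ ·)) (hp : p ≤ xs.length)
    (h1 : ∀ (j : Nat) (_ : j < xs.length), j < p → xs[j] ≤ x)
    (h2 : ∀ (j : Nat) (_ : j < xs.length), p ≤ j → x < xs[j]) :
    (xs.take p ++ x :: xs.drop p).Pairwise (· ≤ ·) := by
  have hg := List.pairwise_iff_getElem.mp hs
  rw [List.pairwise_append]
  refine ⟨List.Pairwise.sublist (List.take_sublist p xs) hs, ?_, ?_⟩
  · rw [List.pairwise_cons]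
    refine ⟨?_, List.Pairwise.sublist (List.drop_sublist p xs) hs⟩
    intro b hb
    rw [List.mem_drop_iff_getElem] at hb
    obtain ⟨j, hm, rfl⟩ := hb
    exact le_of_lt (h2 (p + j) (by omega) (by omega))
  · intro a ha b hb
    rw [List.mem_take_iff_getElem] at ha
    obtain ⟨i, hi, rfl⟩ := ha
    rcases List.mem_cons.mp hb with rfl | hb
    · exact h1 i (by omega) (by omega)
    · rw [List.mem_drop_iff_getElem] at hb
      obtain ⟨j, hj, rfl⟩ := hb
      exact hg i (p + j) (by omega) (by omega) (by omega)

lemma loop_inv (xs : List Int) (hx : xs ≠ []) (n : Nat) (h1n : 1 ≤ n) (hnL : n ≤ xs.length) :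
    ((PySem.List.pyRange 1 (n : Int)).foldl
      (fun (st : List Int × List Int) i =>
        let x := PySem.List.pyGetD xs i 0
        let pos := PySem.List.bisectRight st.1 x
        (PySem.List.insert st.1 (pos : Int) x,
         PySem.List.pySetD st.2 i ((pos : Int) + 1)))
      ([xs.getD 0 0], List.replicate xs.length 1)).1.Perm (xs.take n) ∧
    ((PySem.List.pyRange 1 (n : Int)).foldl
      (fun (st : List Int × List Int) i =>
        let x := PySem.List.pyGetD xs i 0
        let pos := PySem.List.bisectRight st.1 x
        (PySem.List.insert st.1 (pos : Int) x,
         PySem.List.pySetD st.2 i ((pos : Int) + 1)))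
      ([xs.getD 0 0], List.replicate xs.length 1)).1.Pairwise (· ≤ ·) ∧
    ((PySem.List.pyRange 1 (n : Int)).foldl
      (fun (st : List Int × List Int) i =>
        let x := PySem.List.pyGetD xs i 0
        let pos := PySem.List.bisectRight st.1 x
        (PySem.List.insert st.1 (pos : Int) x,
         PySem.List.pySetD st.2 i ((pos : Int) + 1)))
      ([xs.getD 0 0], List.replicate xs.length 1)).2 =
      (List.range xs.length).map (fun k => if k < n then bVal xs k else 1) := by
  induction n with
  | zero => omega
  | succ n ih =>
    by_cases hn1 : n = 0
    · subst hn1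
      rw [PySem.List.pyRange_one_eq_nil (by norm_num)]
      simp only [List.foldl_nil]
      obtain ⟨o0, rest, rfl⟩ := List.exists_cons_of_ne_nil hx
      refine ⟨by simp, by simp, ?_⟩
      apply List.ext_getElem (by simp)
      intro i hi1 hi2
      simp only [List.getElem_replicate, List.getElem_map, List.getElem_range]
      split_ifs with h
      · interval_cases i
        simp [bVal]
      · rfl
    · have h1n' : 1 ≤ n := by omega
      obtain ⟨hperm, hsort, hans⟩ := ih h1n' (by omega)
      have hcast : ((n : Int) + 1) = ((n + 1 : Nat) : Int) := by push_cast; ring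
      rw [← hcast, PySem.List.pyRange_one_succ_right (by exact_mod_cast h1n'), List.foldl_append,
          List.foldl_cons, List.foldl_nil]
      set st := ((PySem.List.pyRange 1 (n : Int)).foldl
        (fun (st : List Int × List Int) i =>
          let x := PySem.List.pyGetD xs i 0
          let pos := PySem.List.bisectRight st.1 x
          (PySem.List.insert st.1 (pos : Int) x,
           PySem.List.pySetD st.2 i ((pos : Int) + 1)))
        ([xs.getD 0 0], List.replicate xs.length 1)) with hst
      simp only []
      have hxval : PySem.List.pyGetD xs (n : Int) 0 = xs.getD n 0 := PySem.List.pyGetD_natCast xs n 0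
      set x := PySem.List.pyGetD xs (n : Int) 0 with hxdef
      set pos := PySem.List.bisectRight st.1 x with hposdef
      obtain ⟨hple, hlo, hhi⟩ := PySem.List.bisectRight_spec st.1 x hsort
      have hlen1 : st.1.length = n := by
        rw [hperm.length_eq, List.length_take]; omega
    -- pos = count of elements ≤ x in the first n obstacles
      have hcnt : st.1.countP (fun v => decide (v ≤ x)) = pos := countP_split st.1 x pos hple hlo hhi
      have hcnt' : (xs.take n).countP (fun v => decide (v ≤ x)) = pos := by
        rw [← hperm.countP_eq]; exact hcnt
      have hins : PySem.List.insert st.1 (pos : Int) x = st.1.take pos ++ x :: st.1.drop pos :=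
        PySem.List.insert_natCast st.1 pos x hple
      have hnL' : n < xs.length := by omega
      constructor
      · -- permutation invariant
        rw [hins]
        have hxg : x = xs[n] := by
          rw [hxval, List.getD_eq_getElem?_getD, List.getElem?_eq_getElem hnL']
          rfl
        have htake : xs.take (n + 1) = xs.take n ++ [x] := by
          rw [List.take_add_one, List.getElem?_eq_getElem hnL', hxg]
          rfl
        have e1 : (st.1.take pos ++ x :: st.1.drop pos).Perm (x :: st.1) := by
          have := List.perm_middle (a := x) (l₁ := st.1.take pos) (l₂ := st.1.drop pos)
          simpa [List.take_append_drop] using this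
        have e2 : (x :: xs.take n).Perm (xs.take (n + 1)) := by
          rw [htake]
          simpa using (List.perm_middle (a := x) (l₁ := xs.take n) (l₂ := ([] : List Int))).symm
        exact e1.trans ((hperm.cons x).trans e2)
      constructor
      · rw [hins]
        exact pairwise_split st.1 x pos hsort hple hlo hhi
      · -- answer list invariant
        rw [PySem.List.pySetD_natCast st.2 n ((pos : Int) + 1), hans]
        apply List.ext_getElem (by simp)
        intro i hi1 hi2
        rw [List.getElem_set]
        simp only [List.getElem_map, List.getElem_range]
        have hival : bVal xs n = (pos : Int) + 1 := by
          unfold bVal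
          rw [← hxval, hcnt']
          ring
        by_cases hin : n = i
        · subst hin
          simp [hival]
        · simp only [if_neg hin]
          have : i < n + 1 ↔ i < n := by omega
          simp [this]

-- ===== VERDICT (by name: the statement is the Claim_ definition above) =====
theorem longest_obstacle_course2_spec : Claim_equal_longest_obstacle_course2 := by
  intro obstacles _ hpre
  unfold Spec_longest_obstacle_course2
  obtain ⟨o0, rest, rfl⟩ := List.exists_cons_of_ne_nil hpre
  have hL : 1 ≤ (o0 :: rest).length := by simp
  obtain ⟨-, -, hans⟩ := loop_inv (o0 :: rest) (by simp) (o0 :: rest).length hL le_rfl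
  simp only [longest_obstacle_course2, PySem.List.len_eq]
  simp only [List.getD_cons_zero] at hans
  rw [hans, alt_eq]
  refine List.map_congr_left ?_
  intro k hk
  rw [List.mem_range] at hk
  exact if_pos hk

@[simp] theorem longest_obstacle_course2_raises : Claim_raises_longest_obstacle_course2 := by
  unfold Claim_raises_longest_obstacle_course2
  exact ⟨fun xs _ hr hp => hp hr, by decide⟩
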